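-- pv_equiv track=rewrite | github.com/waivegames-oss/umamusume-sweepy | module/umamusume/scenario/mant/shop.py | name_based_shift
-- ===== SOURCE A (Python) =====
-- def name_based_shift(by_frame, prev_fi, curr_fi):
--     prev_items = [(k, y) for k, c, y, t, b in by_frame[prev_fi]]
--     curr_items = [(k, y) for k, c, y, t, b in by_frame[curr_fi]]
--     shifts = []
--     used_curr = set()
--     for pk, py in prev_items:
--         best_shift = None
--         best_dist = 9999
--         best_ci = -1
--         for ci, (ck, cy) in enumerate(curr_items):
--             if ci in used_curr:
--                 continue
--             if pk == ck:
--                 dist = abs(py - cy)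
--                 if dist < best_dist:
--                     best_dist = dist
--                     best_shift = py - cy
--                     best_ci = ci
--         if best_shift is not None:
--             shifts.append(best_shift)
--             used_curr.add(best_ci)
--     if shifts:
--         shifts.sort()
--         return shifts[len(shifts) // 2]
--     return 0
-- ===== SOURCE B (Python) =====
-- def _match(pys, cys):
--     # Recursively pair each previous y with the remaining current y of minimal
--     # |py - cy| (first one on ties, only if the distance beats 9999), removing
--     # it from the pool; returns the list of signed shifts.
--     if not pys:
--         return []
--     py, rest = pys[0], pys[1:]
--     best = None
--     for cy in cys:
--         if abs(py - cy) < (9999 if best is None else abs(py - best)):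
--             best = cy
--     if best is None:
--         return _match(rest, cys)
--     pool = list(cys)
--     pool.remove(best)
--     return [py - best] + _match(rest, pool)
--
--
-- def name_based_shift(by_frame, prev_fi, curr_fi):
--     # The greedy matching never pairs items of different keys, so it decomposes
--     # into independent per-key matchings; the median sorts the shifts anyway,
--     # so collecting them grouped by key (first-occurrence order) is harmless.
--     prev = by_frame[prev_fi]
--     curr = by_frame[curr_fi]
--     keys = []
--     for k, c, y, t, b in prev:
--         if k not in keys:
--             keys.append(k)
--     shifts = []
--     for k in keys:
--         pys = [y for kk, c, y, t, b in prev if kk == k]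
--         cys = [y for kk, c, y, t, b in curr if kk == k]
--         shifts += _match(pys, cys)
--     if not shifts:
--         return 0
--     shifts.sort()
--     return shifts[len(shifts) // 2]
-- ===== Notes on version B (the rewrite author's own statement) =====
-- stated objective: alternative
-- what changed: B exploits that the greedy matching never pairs different keys and that the median sorts the shifts: it stages the work per key (first-occurrence key order), matching each key's previous ys against that key's current ys by a recursive removal-based matcher (pick first nearest remaining value, remove it from the pool), with no used-index set, no enumerate and no global scan.
import Mathlib
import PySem

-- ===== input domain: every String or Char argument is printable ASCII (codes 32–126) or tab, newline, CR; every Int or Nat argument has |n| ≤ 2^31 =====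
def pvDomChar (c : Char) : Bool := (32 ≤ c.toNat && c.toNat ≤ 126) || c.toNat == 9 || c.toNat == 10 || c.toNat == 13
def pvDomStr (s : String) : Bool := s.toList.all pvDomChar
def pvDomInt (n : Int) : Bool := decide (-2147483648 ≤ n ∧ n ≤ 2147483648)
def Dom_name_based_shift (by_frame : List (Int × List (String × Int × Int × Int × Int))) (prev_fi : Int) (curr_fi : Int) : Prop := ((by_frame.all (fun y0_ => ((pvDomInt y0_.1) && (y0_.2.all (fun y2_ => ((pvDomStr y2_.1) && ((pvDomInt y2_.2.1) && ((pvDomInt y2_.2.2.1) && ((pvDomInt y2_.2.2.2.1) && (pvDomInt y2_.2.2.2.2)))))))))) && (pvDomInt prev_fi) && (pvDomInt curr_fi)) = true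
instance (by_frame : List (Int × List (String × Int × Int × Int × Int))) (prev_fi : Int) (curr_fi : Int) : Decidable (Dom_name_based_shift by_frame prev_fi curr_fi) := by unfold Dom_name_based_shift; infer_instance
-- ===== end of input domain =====

-- B decomposes the greedy matching per key (it never pairs different keys; the median sorts
-- the shifts, so per-key grouping of the shift list is harmless) and matches each key's
-- previous ys against its current ys by a recursive removal-based matcher, with no used-index
-- set and no enumerate (objective: alternative).

-- ===== PORT A =====
-- inner loop body: 'for ci, (ck, cy) in enumerate(curr_items): …' with state (best_shift, best_dist, best_ci)
def nbsStepA (pk : String) (py : Int) (used : PySem.Set Int)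
    (b : Option Int × Int × Int) (ce : Int × String × Int) : Option Int × Int × Int :=
  if PySem.Set.contains used ce.1 then b
  else if pk == ce.2.1 then
    let dist := |py - ce.2.2|
    if dist < b.2.1 then (some (py - ce.2.2), dist, ce.1) else b
  else b

-- outer loop body: one previous item (pk, py) against curr_items, state (shifts, used_curr)
def nbsOuterA (curr_items : List (String × Int))
    (st : List Int × PySem.Set Int) (pe : String × Int) : List Int × PySem.Set Int :=
  let inner := (PySem.List.enumerate curr_items).foldl (nbsStepA pe.1 pe.2 st.2) (none, 9999, -1)
  match inner.1 with
  | some s => (st.1 ++ [s], PySem.Set.add st.2 inner.2.2)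
  | none => st

def name_based_shift (by_frame : List (Int × List (String × Int × Int × Int × Int))) (prev_fi : Int) (curr_fi : Int) : Int :=
  let prev_items := (((PySem.Dict.mk by_frame).get? prev_fi).getD []).map (fun e => (e.1, e.2.2.1))
  let curr_items := (((PySem.Dict.mk by_frame).get? curr_fi).getD []).map (fun e => (e.1, e.2.2.1))
  let res := prev_items.foldl (nbsOuterA curr_items) ([], PySem.Set.empty)
  if res.1 ≠ [] then
    PySem.List.pyGetD (PySem.List.sorted res.1 (fun x => x) false)
      (PySem.Int.floordiv (PySem.List.len res.1) 2) 0
  else 0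

-- ===== PORT B =====
-- 'best = None; for cy in cys: if abs(py - cy) < (9999 if best is None else abs(py - best)): best = cy'
def nbsPick (py : Int) (cys : List Int) : Option Int :=
  cys.foldl (fun b cy =>
    if |py - cy| < (match b with | none => (9999 : Int) | some bv => |py - bv|)
    then some cy else b) none

-- _match(pys, cys): recursive removal-based matcher
def nbsMatch : List Int → List Int → List Int
  | [], _ => []
  | py :: rest, cys =>
    match nbsPick py cys with
    | none => nbsMatch rest cys
    | some best => (py - best) :: nbsMatch rest ((PySem.List.remove? cys best).getD cys)

-- 'keys = []; for k, … in prev: if k not in keys: keys.append(k)'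
def nbsKeys (l : List (String × Int × Int × Int × Int)) : List String :=
  l.foldl (fun seen e => if seen.contains e.1 then seen else seen ++ [e.1]) []

def name_based_shift_alt (by_frame : List (Int × List (String × Int × Int × Int × Int))) (prev_fi : Int) (curr_fi : Int) : Int :=
  let prev := ((PySem.Dict.mk by_frame).get? prev_fi).getD []
  let curr := ((PySem.Dict.mk by_frame).get? curr_fi).getD []
  let shifts := (nbsKeys prev).foldl (fun acc k =>
      acc ++ nbsMatch ((prev.filter (fun e => e.1 == k)).map (fun e => e.2.2.1))
                      ((curr.filter (fun e => e.1 == k)).map (fun e => e.2.2.1))) []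
  if shifts = [] then 0
  else
    PySem.List.pyGetD (PySem.List.sorted shifts (fun x => x) false)
      (PySem.Int.floordiv (PySem.List.len shifts) 2) 0

-- ===== PRECONDITION & SPEC =====
-- Pre_ excludes exactly the inputs where Python A raises KeyError: a frame index absent from by_frame.
def Pre_name_based_shift (by_frame : List (Int × List (String × Int × Int × Int × Int))) (prev_fi : Int) (curr_fi : Int) : Prop :=
  (PySem.Dict.mk by_frame).contains prev_fi = true ∧ (PySem.Dict.mk by_frame).contains curr_fi = true
instance (by_frame : List (Int × List (String × Int × Int × Int × Int))) (prev_fi : Int) (curr_fi : Int) : Decidable (Pre_name_based_shift by_frame prev_fi curr_fi) := by unfold Pre_name_based_shift; infer_instance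

def pvWitness_name_based_shift : (List (Int × List (String × Int × Int × Int × Int))) × Int × Int :=
  ([(0, [("a", 0, 1, 0, 0)]), (1, [("a", 0, 3, 0, 0), ("b", 0, 5, 0, 0)])], 0, 1)

def Spec_name_based_shift (by_frame : List (Int × List (String × Int × Int × Int × Int))) (prev_fi : Int) (curr_fi : Int) (out : Int) : Prop := out = name_based_shift_alt by_frame prev_fi curr_fi
instance (by_frame : List (Int × List (String × Int × Int × Int × Int))) (prev_fi : Int) (curr_fi : Int) (out : Int) : Decidable (Spec_name_based_shift by_frame prev_fi curr_fi out) := by unfold Spec_name_based_shift; infer_instance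

-- ===== CLAIM (what is proved, stated in full; the proofs are below) =====
def Claim_equal_name_based_shift : Prop := ∀ (by_frame : List (Int × List (String × Int × Int × Int × Int))) (prev_fi : Int) (curr_fi : Int), Dom_name_based_shift by_frame prev_fi curr_fi → Pre_name_based_shift by_frame prev_fi curr_fi → Spec_name_based_shift by_frame prev_fi curr_fi (name_based_shift by_frame prev_fi curr_fi)

-- ===== LEMMAS AND PROOFS =====

-- proof-side: A's candidate state abstracted to the chosen (index, cy) pair
def nbsDist (py : Int) : Option (Int × Int) → Int
  | none => 9999
  | some c => |py - c.2|

def nbsStepP (py : Int) (b : Option (Int × Int)) (c : Int × Int) : Option (Int × Int) :=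
  if |py - c.2| < nbsDist py b then some c else b

def nbsPickP (py : Int) (l : List (Int × Int)) : Option (Int × Int) :=
  l.foldl (nbsStepP py) none

def nbsConv (py : Int) : Option (Int × Int) → Option Int × Int × Int
  | none => (none, 9999, -1)
  | some c => (some (py - c.2), |py - c.2|, c.1)

-- remaining per-key pool of (original index, cy), as determined by A's used set
def nbsPoolOf (curr_items : List (String × Int)) (used : PySem.Set Int) (k : String) : List (Int × Int) :=
  ((PySem.List.enumerate curr_items).filter
    (fun p => p.2.1 == k && !(PySem.Set.contains used p.1))).map (fun p => (p.1, p.2.2))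

-- intermediate: A's interleaved greedy, rephrased over per-key pools
def nbsInter (pools : String → List (Int × Int)) : List (String × Int) → List Int
  | [] => []
  | (k, py) :: rest =>
    match nbsPickP py (pools k) with
    | none => nbsInter pools rest
    | some c =>
        (py - c.2) ::
          nbsInter (fun j => if j = k then (pools k).filter (fun e => !(e.1 == c.1)) else pools j) rest

-- first-occurrence key list, recursively
def nbsFKeys : List (String × Int) → List String
  | [] => []
  | (k, _) :: r => k :: (nbsFKeys r).filter (fun j => !(j == k))

def nbsProjV (k : String) (l : List (String × Int)) : List Int :=
  (l.filter (fun e => e.1 == k)).map (·.2)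


-- characterization of the strict-< left fold: it returns the first element attaining the minimum
lemma nbs_pickP_spec (py : Int) : ∀ (l : List (Int × Int)) (b : Option (Int × Int)),
    (l.foldl (nbsStepP py) b = b ∧ ∀ x ∈ l, ¬ |py - x.2| < nbsDist py b)
  ∨ (∃ c t₁ t₂, l.foldl (nbsStepP py) b = some c ∧ l = t₁ ++ c :: t₂ ∧
      |py - c.2| < nbsDist py b ∧ ∀ x ∈ t₁, |py - c.2| < |py - x.2|) := by
  intro l
  induction l with
  | nil => intro b; exact Or.inl ⟨rfl, by simp⟩
  | cons y l ih =>
    intro b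
    by_cases h : |py - y.2| < nbsDist py b
    · have hstep : nbsStepP py b y = some y := by simp [nbsStepP, h]
      rcases ih (some y) with ⟨he, hall⟩ | ⟨c, t₁, t₂, he, hl, hc, h₁⟩
      · refine Or.inr ⟨y, [], l, ?_, by simp, h, by simp⟩
        simp [List.foldl_cons, hstep, he]
      · refine Or.inr ⟨c, y :: t₁, t₂, ?_, by simp [hl], ?_, ?_⟩
        · simp [List.foldl_cons, hstep, he]
        · exact lt_trans hc h
        · intro x hx
          rcases List.mem_cons.mp hx with rfl | hx
          · exact hc
          · exact h₁ x hx
    · have hstep : nbsStepP py b y = b := by simp [nbsStepP, h]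
      rcases ih b with ⟨he, hall⟩ | ⟨c, t₁, t₂, he, hl, hc, h₁⟩
      · refine Or.inl ⟨by simp [List.foldl_cons, hstep, he], ?_⟩
        intro x hx
        rcases List.mem_cons.mp hx with rfl | hx
        · exact h
        · exact hall x hx
      · refine Or.inr ⟨c, y :: t₁, t₂, by simp [List.foldl_cons, hstep, he], by simp [hl], hc, ?_⟩
        intro x hx
        rcases List.mem_cons.mp hx with rfl | hx
        · exact lt_of_lt_of_le hc (not_lt.mp h)
        · exact h₁ x hx

-- B's value-level pick is the snd-projection of the pair-level pick
lemma nbs_pick_fold_map (py : Int) : ∀ (l : List (Int × Int)) (b : Option (Int × Int)),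
    (l.map (·.2)).foldl (fun b cy =>
        if |py - cy| < (match b with | none => (9999 : Int) | some bv => |py - bv|)
        then some cy else b) (b.map (·.2))
      = Option.map (·.2) (l.foldl (nbsStepP py) b) := by
  intro l
  induction l with
  | nil => intro b; rfl
  | cons y l ih =>
    intro b
    have hmatch : (match b.map (·.2) with | none => (9999 : Int) | some bv => |py - bv|) = nbsDist py b := by
      cases b <;> rfl
    simp only [List.map_cons, List.foldl_cons, hmatch, nbsStepP]
    by_cases h : |py - y.2| < nbsDist py b
    · rw [if_pos h, if_pos h, show some y.2 = Option.map (·.2) (some y) from rfl, ih]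
    · rw [if_neg h, if_neg h, ih]

lemma nbs_pick_map (py : Int) (l : List (Int × Int)) :
    nbsPick py (l.map (·.2)) = Option.map (·.2) (nbsPickP py l) := by
  have := nbs_pick_fold_map py l none
  simpa [nbsPick, nbsPickP] using this

lemma nbs_remove_append (v : Int) : ∀ (xs ys : List Int), v ∉ xs →
    PySem.List.remove? (xs ++ v :: ys) v = some (xs ++ ys) := by
  intro xs
  induction xs with
  | nil => intro ys _; simp [PySem.List.remove?_cons_self]
  | cons x xs ih =>
    intro ys hv
    have hx : x ≠ v := fun h => hv (h ▸ List.mem_cons_self)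
    rw [List.cons_append, PySem.List.remove?_cons_of_ne _ hx,
      ih ys (fun h => hv (List.mem_cons_of_mem _ h))]
    rfl

-- removing the picked pair by value (B) = removing it by original index (pool filter)
lemma nbs_remove_corr (py : Int) (l : List (Int × Int)) (c : Int × Int)
    (hnd : l.Pairwise (fun p q => p.1 < q.1)) (hp : nbsPickP py l = some c) :
    (PySem.List.remove? (l.map (·.2)) c.2).getD (l.map (·.2))
      = (l.filter (fun e => !(e.1 == c.1))).map (·.2) := by
  rcases nbs_pickP_spec py l none with ⟨he, _⟩ | ⟨cc, t₁, t₂, he, hl, _, h₁⟩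
  · rw [nbsPickP] at hp; rw [he] at hp; cases hp
  · rw [nbsPickP] at hp; rw [he] at hp
    injection hp with hc; subst hc
    subst hl
    have hnotin : cc.2 ∉ t₁.map (·.2) := by
      intro hmem
      rcases List.mem_map.mp hmem with ⟨x, hx, hx2⟩
      have := h₁ x hx
      rw [hx2] at this
      exact lt_irrefl _ this
    have hrem : PySem.List.remove? ((t₁ ++ cc :: t₂).map (·.2)) cc.2
        = some (t₁.map (·.2) ++ t₂.map (·.2)) := by
      rw [List.map_append, List.map_cons]
      exact nbs_remove_append cc.2 _ _ hnotin
    rw [hrem]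
    have hpa := List.pairwise_append.mp hnd
    have ht₁ : ∀ x ∈ t₁, (!(x.1 == cc.1)) = true := by
      intro x hx
      have := hpa.2.2 x hx cc List.mem_cons_self
      simp [Int.ne_of_lt this]
    have ht₂ : ∀ x ∈ t₂, (!(x.1 == cc.1)) = true := by
      intro x hx
      have := (List.pairwise_cons.mp hpa.2.1).1 x hx
      simp [Ne.symm (Int.ne_of_lt this)]
    rw [List.filter_append, List.filter_cons]
    simp only [beq_self_eq_true, Bool.not_true, Bool.false_eq_true, if_false]
    rw [List.filter_eq_self.mpr ht₁, List.filter_eq_self.mpr ht₂, List.map_append]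
    simp



lemma nbs_fkeys_nodup : ∀ (l : List (String × Int)), (nbsFKeys l).Nodup := by
  intro l
  induction l with
  | nil => exact List.nodup_nil
  | cons e r ih =>
    obtain ⟨k, y⟩ := e
    refine List.Nodup.cons ?_ (ih.filter _)
    intro hmem
    have := (List.mem_filter.mp hmem).2
    simp at this

lemma nbs_mem_fkeys : ∀ (l : List (String × Int)) (j : String),
    j ∈ nbsFKeys l ↔ ∃ e ∈ l, e.1 = j := by
  intro l
  induction l with
  | nil => intro j; simp [nbsFKeys]
  | cons e r ih =>
    intro j
    obtain ⟨k, y⟩ := e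
    simp only [nbsFKeys, List.mem_cons, List.mem_filter, ih]
    constructor
    · rintro (rfl | ⟨⟨x, hx, rfl⟩, _⟩)
      · exact ⟨(j, y), Or.inl rfl, rfl⟩
      · exact ⟨x, Or.inr hx, rfl⟩
    · rintro ⟨x, hx, rfl⟩
      rcases hx with rfl | hx
      · exact Or.inl rfl
      · by_cases hjk : x.1 = k
        · exact Or.inl hjk
        · exact Or.inr ⟨⟨x, hx, rfl⟩, by simp [hjk]⟩

lemma nbs_flatMap_congr (L : List String) (f g : String → List Int)
    (h : ∀ j ∈ L, f j = g j) : L.flatMap f = L.flatMap g := by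
  induction L with
  | nil => rfl
  | cons a L ih =>
    simp only [List.flatMap_cons, h a List.mem_cons_self]
    rw [ih (fun j hj => h j (List.mem_cons_of_mem _ hj))]

lemma nbs_flatMap_key (k : String) (L : List String) (G : String → List Int)
    (hnd : L.Nodup) (hk : k ∉ L → G k = []) :
    ((k :: L.filter (fun j => !(j == k))).flatMap G).Perm (L.flatMap G) := by
  by_cases hmem : k ∈ L
  · obtain ⟨s, t, rfl⟩ := List.append_of_mem hmem
    rw [List.nodup_append] at hnd
    have hks : k ∉ s := fun h => (hnd.2.2 k h k List.mem_cons_self) rfl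
    have hkt : k ∉ t := (List.nodup_cons.mp hnd.2.1).1
    have hfs : s.filter (fun j => !(j == k)) = s := List.filter_eq_self.mpr (by
      intro x hx
      simp only [Bool.not_eq_eq_eq_not, Bool.not_true, beq_eq_false_iff_ne]
      exact fun h => hks (h ▸ hx))
    have hft : t.filter (fun j => !(j == k)) = t := List.filter_eq_self.mpr (by
      intro x hx
      simp only [Bool.not_eq_eq_eq_not, Bool.not_true, beq_eq_false_iff_ne]
      exact fun h => hkt (h ▸ hx))
    rw [List.filter_append, List.filter_cons]
    simp only [beq_self_eq_true, Bool.not_true, Bool.false_eq_true, if_false, hfs, hft]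
    simp only [List.flatMap_cons, List.flatMap_append]
    have hcomm := (List.perm_append_comm (l₁ := G k) (l₂ := s.flatMap G)).append_right (t.flatMap G)
    simpa [List.append_assoc] using hcomm
  · have hf : L.filter (fun j => !(j == k)) = L := List.filter_eq_self.mpr (by
      intro x hx
      simp only [Bool.not_eq_eq_eq_not, Bool.not_true, beq_eq_false_iff_ne]
      exact fun h => hmem (h ▸ hx))
    rw [hf, List.flatMap_cons, hk hmem, List.nil_append]

lemma nbs_projV_cons_self (k : String) (py : Int) (rest : List (String × Int)) :
    nbsProjV k ((k, py) :: rest) = py :: nbsProjV k rest := by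
  simp [nbsProjV]

lemma nbs_projV_cons_ne (k j : String) (py : Int) (rest : List (String × Int)) (h : j ≠ k) :
    nbsProjV j ((k, py) :: rest) = nbsProjV j rest := by
  simp [nbsProjV, Ne.symm h]

lemma nbs_projV_eq_nil (k : String) (l : List (String × Int)) (h : k ∉ nbsFKeys l) :
    nbsProjV k l = [] := by
  have hno : ∀ e ∈ l, e.1 ≠ k := by
    intro e he hek
    exact h ((nbs_mem_fkeys l k).mpr ⟨e, he, hek⟩)
  simp only [nbsProjV]
  rw [List.filter_eq_nil_iff.mpr (fun e he => by simp [hno e he])]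
  rfl

-- STEP 2: the interleaved per-pool greedy is a permutation of the per-key grouped matcher
lemma nbs_inter_perm : ∀ (prev : List (String × Int)) (pools : String → List (Int × Int)),
    (∀ k, (pools k).Pairwise (fun p q => p.1 < q.1)) →
    (nbsInter pools prev).Perm
      ((nbsFKeys prev).flatMap (fun k => nbsMatch (nbsProjV k prev) ((pools k).map (·.2)))) := by
  intro prev
  induction prev with
  | nil => intro pools _; simp [nbsInter, nbsFKeys]
  | cons e rest ih =>
    intro pools hPW
    obtain ⟨k, py⟩ := e
    have hpickmap := nbs_pick_map py (pools k)
    have hfk : nbsFKeys ((k, py) :: rest) = k :: (nbsFKeys rest).filter (fun j => !(j == k)) := rfl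
    cases hm : nbsPickP py (pools k) with
    | none =>
      have hG : ∀ j ∈ (k :: (nbsFKeys rest).filter (fun j => !(j == k))),
          nbsMatch (nbsProjV j ((k, py) :: rest)) ((pools j).map (·.2))
            = nbsMatch (nbsProjV j rest) ((pools j).map (·.2)) := by
        intro j hj
        rcases List.mem_cons.mp hj with rfl | hj
        · rw [nbs_projV_cons_self, nbsMatch, hpickmap, hm]
          rfl
        · have hjk : j ≠ k := by
            have := (List.mem_filter.mp hj).2; simpa using this
          rw [nbs_projV_cons_ne _ _ _ _ hjk]
      have hknil : k ∉ nbsFKeys rest →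
          nbsMatch (nbsProjV k rest) ((pools k).map (·.2)) = [] := by
        intro hnk; rw [nbs_projV_eq_nil k rest hnk]; rfl
      have h1 : nbsInter pools ((k, py) :: rest) = nbsInter pools rest := by
        simp [nbsInter, hm]
      rw [h1, hfk, nbs_flatMap_congr _ _ _ hG]
      exact (ih pools hPW).trans
        (nbs_flatMap_key k _ _ (nbs_fkeys_nodup rest) hknil).symm
    | some c =>
      have hPW' : ∀ j, (if j = k then (pools k).filter (fun e => !(e.1 == c.1)) else pools j).Pairwise
          (fun p q => p.1 < q.1) := by
        intro j
        by_cases hj : j = k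
        · rw [if_pos hj]; exact (hPW k).filter _
        · rw [if_neg hj]; exact hPW j
      have hG : ∀ j ∈ (k :: (nbsFKeys rest).filter (fun j => !(j == k))),
          nbsMatch (nbsProjV j ((k, py) :: rest)) ((pools j).map (·.2))
            = (if j = k then [py - c.2] else []) ++
              nbsMatch (nbsProjV j rest)
                ((if j = k then (pools k).filter (fun e => !(e.1 == c.1)) else pools j).map (·.2)) := by
        intro j hj
        rcases List.mem_cons.mp hj with hjep | hj
        · rw [hjep]
          rw [nbs_projV_cons_self, nbsMatch, hpickmap, hm]
          simp only [Option.map_some]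
          rw [if_pos trivial, if_pos trivial,
            nbs_remove_corr py (pools k) c (hPW k) hm]
          simp
        · have hjk : j ≠ k := by
            have := (List.mem_filter.mp hj).2; simpa using this
          rw [nbs_projV_cons_ne _ _ _ _ hjk, if_neg hjk, if_neg hjk, List.nil_append]
      have hknil : k ∉ nbsFKeys rest →
          nbsMatch (nbsProjV k rest)
            ((if k = k then (pools k).filter (fun e => !(e.1 == c.1)) else pools k).map (·.2)) = [] := by
        intro hnk; rw [nbs_projV_eq_nil k rest hnk]; rfl
      have h1 : nbsInter pools ((k, py) :: rest)
          = (py - c.2) :: nbsInter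
              (fun j => if j = k then (pools k).filter (fun e => !(e.1 == c.1)) else pools j) rest := by
        simp [nbsInter, hm]
      have hcongr2 : ((nbsFKeys rest).filter (fun j => !(j == k))).flatMap
            (fun j => (if j = k then [py - c.2] else []) ++
              nbsMatch (nbsProjV j rest)
                ((if j = k then (pools k).filter (fun e => !(e.1 == c.1)) else pools j).map (·.2)))
          = ((nbsFKeys rest).filter (fun j => !(j == k))).flatMap
            (fun j => nbsMatch (nbsProjV j rest)
                ((if j = k then (pools k).filter (fun e => !(e.1 == c.1)) else pools j).map (·.2))) := by
        refine nbs_flatMap_congr _ _ _ ?_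
        intro j hj
        have hjk : j ≠ k := by
          have := (List.mem_filter.mp hj).2; simpa using this
        rw [if_neg hjk, List.nil_append]
      rw [h1, hfk, nbs_flatMap_congr _ _ _ hG]
      simp only [List.flatMap_cons]
      rw [if_pos trivial, if_pos trivial, hcongr2]
      simp only [List.cons_append, List.nil_append]
      refine List.Perm.cons _ ?_
      have hkey := (nbs_flatMap_key k (nbsFKeys rest)
        (fun j => nbsMatch (nbsProjV j rest)
          ((if j = k then (pools k).filter (fun e => !(e.1 == c.1)) else pools j).map (·.2)))
        (nbs_fkeys_nodup rest) hknil).symm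
      simp only [List.flatMap_cons] at hkey
      exact (ih _ hPW').trans hkey


lemma nbs_pickP_mem (py : Int) (l : List (Int × Int)) (c : Int × Int)
    (hp : nbsPickP py l = some c) : c ∈ l := by
  rcases nbs_pickP_spec py l none with ⟨he, _⟩ | ⟨cc, t₁, t₂, he, hl, _, _⟩
  · rw [nbsPickP] at hp; rw [he] at hp; cases hp
  · rw [nbsPickP] at hp; rw [he] at hp
    injection hp with hc; subst hc
    rw [hl]; exact List.mem_append_right _ List.mem_cons_self

-- elements whose state-update is skipped can be filtered out of a fold
lemma nbs_foldl_eq_foldl_filter {α β : Type} (l : List α) (p : α → Bool) (f : β → α → β) (init : β)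
    (h : ∀ acc x, x ∈ l → p x = false → f acc x = acc) :
    l.foldl f init = (l.filter p).foldl f init := by
  induction l generalizing init with
  | nil => rfl
  | cons x xs ih =>
    simp only [List.foldl_cons, List.filter_cons]
    by_cases hx : p x = true
    · rw [if_pos hx]
      simp only [List.foldl_cons]
      exact ih _ (fun acc y hy => h acc y (List.mem_cons_of_mem _ hy))
    · rw [if_neg hx, h init x List.mem_cons_self (by simpa using hx)]
      exact ih _ (fun acc y hy => h acc y (List.mem_cons_of_mem _ hy))

lemma nbs_contains_add (used : PySem.Set Int) (i x : Int) :
    PySem.Set.contains (PySem.Set.add used i) x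
      = (PySem.Set.contains used x || x == i) := by
  rw [Bool.eq_iff_iff]
  simp only [Bool.or_eq_true, beq_iff_eq]
  rw [PySem.Set.contains_iff, PySem.Set.contains_iff, PySem.Set.mem_add]

-- A's inner scan over enumerate with its guards = the pick over the remaining per-key pool
lemma nbs_innerA_aux (pk : String) (py : Int) (used : PySem.Set Int) :
    ∀ (l : List (Int × String × Int)) (b : Option (Int × Int)),
    (∀ p ∈ l, (p.2.1 == pk && !(PySem.Set.contains used p.1)) = true) →
    l.foldl (nbsStepA pk py used) (nbsConv py b)
      = nbsConv py ((l.map (fun p => (p.1, p.2.2))).foldl (nbsStepP py) b) := by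
  intro l
  induction l with
  | nil => intro b _; rfl
  | cons p l ih =>
    intro b hpred
    have hp := hpred p List.mem_cons_self
    rw [Bool.and_eq_true] at hp
    have hkey : (pk == p.2.1) = true := by
      have := hp.1; rw [beq_iff_eq] at this ⊢; exact this.symm
    have hused : PySem.Set.contains used p.1 = false := by
      have := hp.2; simpa using this
    have hconv : (nbsConv py b).2.1 = nbsDist py b := by cases b <;> rfl
    have hstep : nbsStepA pk py used (nbsConv py b) p
        = nbsConv py (nbsStepP py b (p.1, p.2.2)) := by
      unfold nbsStepA nbsStepP
      rw [hused, hkey]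
      simp only [Bool.false_eq_true, if_false, if_true, hconv]
      by_cases hd : |py - p.2.2| < nbsDist py b
      · rw [if_pos hd, if_pos hd]; rfl
      · rw [if_neg hd, if_neg hd]
    simp only [List.foldl_cons, List.map_cons, hstep]
    exact ih _ (fun q hq => hpred q (List.mem_cons_of_mem _ hq))

lemma nbs_innerA_eq (curr_items : List (String × Int)) (pk : String) (py : Int)
    (used : PySem.Set Int) :
    (PySem.List.enumerate curr_items).foldl (nbsStepA pk py used) (none, 9999, -1)
      = nbsConv py (nbsPickP py (nbsPoolOf curr_items used pk)) := by
  rw [nbs_foldl_eq_foldl_filter (PySem.List.enumerate curr_items)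
    (fun p => p.2.1 == pk && !(PySem.Set.contains used p.1)) _ _
    (by
      intro acc x _ hx
      unfold nbsStepA
      rw [Bool.and_eq_false_iff] at hx
      rcases hx with hx | hx
      · have : ¬ (pk == x.2.1) = true := by
          rw [beq_eq_false_iff_ne] at hx
          rw [beq_iff_eq]; exact fun h => hx h.symm
        by_cases hu : PySem.Set.contains used x.1 = true
        · rw [if_pos hu]
        · rw [if_neg hu, if_neg this]
      · have hu : PySem.Set.contains used x.1 = true := by
          simpa using hx
        rw [if_pos hu])]
  have := nbs_innerA_aux pk py used
    ((PySem.List.enumerate curr_items).filter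
      (fun p => p.2.1 == pk && !(PySem.Set.contains used p.1))) none
    (fun p hp => (List.mem_filter.mp hp).2)
  simpa [nbsConv, nbsPoolOf, nbsPickP] using this

lemma nbs_mem_pairwise_lt {α : Type} {l : List (Int × α)}
    (h : l.Pairwise (fun p q => p.1 < q.1)) :
    ∀ p ∈ l, ∀ q ∈ l, p.1 = q.1 → p = q := by
  induction l with
  | nil => intro p hp; cases hp
  | cons a l ih =>
    rcases List.pairwise_cons.mp h with ⟨ha, hl⟩
    intro p hp q hq heq
    rcases List.mem_cons.mp hp with hpa | hp2
    · rcases List.mem_cons.mp hq with hqa | hq2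
      · rw [hpa, hqa]
      · subst hpa
        exact absurd heq (Int.ne_of_lt (ha q hq2))
    · rcases List.mem_cons.mp hq with hqa | hq2
      · subst hqa
        exact absurd heq (Ne.symm (Int.ne_of_lt (ha p hp2)))
      · exact ih hl p hp2 q hq2 heq

lemma nbs_poolOf_pairwise (curr_items : List (String × Int)) (used : PySem.Set Int) (k : String) :
    (nbsPoolOf curr_items used k).Pairwise (fun p q => p.1 < q.1) := by
  unfold nbsPoolOf
  refine List.pairwise_map.mpr ?_
  exact (PySem.List.pairwise_lt_enumerate curr_items 0).filter _

lemma nbs_poolOf_add (curr_items : List (String × Int)) (used : PySem.Set Int)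
    (pk : String) (c : Int × Int) (hmem : c ∈ nbsPoolOf curr_items used pk) :
    (fun j => nbsPoolOf curr_items (PySem.Set.add used c.1) j)
      = (fun j => if j = pk
          then (nbsPoolOf curr_items used pk).filter (fun e => !(e.1 == c.1))
          else nbsPoolOf curr_items used j) := by
  obtain ⟨q, hq, hqc⟩ := List.mem_map.mp hmem
  have hqf := List.mem_filter.mp hq
  have hq1 : q.1 = c.1 := by rw [← hqc]
  have hqk : q.2.1 = pk := by
    have := hqf.2; rw [Bool.and_eq_true, beq_iff_eq] at this; exact this.1
  funext j
  by_cases hj : j = pk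
  · subst hj
    rw [if_pos rfl]
    unfold nbsPoolOf
    rw [List.filter_map, List.filter_filter]
    congr 1
    refine List.filter_congr ?_
    intro p _
    rw [nbs_contains_add]
    simp only [Function.comp]
    cases hkk : (p.2.1 == j) <;> cases hcu : PySem.Set.contains used p.1 <;>
      cases hpc : (p.1 == c.1) <;> simp
  · rw [if_neg hj]
    unfold nbsPoolOf
    congr 1
    refine List.filter_congr ?_
    intro p hp
    rw [nbs_contains_add]
    by_cases hpk : (p.2.1 == j) = true
    · have hpc : (p.1 == c.1) = false := by
        rw [beq_eq_false_iff_ne]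
        intro hpe
        have := nbs_mem_pairwise_lt (PySem.List.pairwise_lt_enumerate curr_items 0)
          p hp q hqf.1 (by rw [hpe, hq1])
        rw [beq_iff_eq] at hpk
        exact hj (by rw [← hpk, this, hqk])
      rw [hpc]
      simp
    · simp only [Bool.not_eq_true] at hpk
      rw [hpk]
      simp

-- STEP 1: A's outer fold = the interleaved per-pool greedy
lemma nbs_stepA_fold (curr_items : List (String × Int)) :
    ∀ (prev : List (String × Int)) (shifts : List Int) (used : PySem.Set Int),
    (prev.foldl (nbsOuterA curr_items) (shifts, used)).1
      = shifts ++ nbsInter (nbsPoolOf curr_items used) prev := by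
  intro prev
  induction prev with
  | nil => intro shifts used; simp [nbsInter]
  | cons e rest ih =>
    intro shifts used
    obtain ⟨pk, py⟩ := e
    rw [List.foldl_cons]
    have houter : nbsOuterA curr_items (shifts, used) (pk, py)
        = match nbsPickP py (nbsPoolOf curr_items used pk) with
          | none => (shifts, used)
          | some c => (shifts ++ [py - c.2], PySem.Set.add used c.1) := by
      unfold nbsOuterA
      rw [nbs_innerA_eq]
      cases nbsPickP py (nbsPoolOf curr_items used pk) <;> rfl
    cases hm : nbsPickP py (nbsPoolOf curr_items used pk) with
    | none =>
      rw [houter, hm]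
      rw [ih shifts used]
      have : nbsInter (nbsPoolOf curr_items used) ((pk, py) :: rest)
          = nbsInter (nbsPoolOf curr_items used) rest := by
        simp [nbsInter, hm]
      rw [this]
    | some c =>
      rw [houter, hm]
      rw [ih (shifts ++ [py - c.2]) (PySem.Set.add used c.1)]
      have hpool := nbs_poolOf_add curr_items used pk c (nbs_pickP_mem py _ c hm)
      have : nbsInter (nbsPoolOf curr_items used) ((pk, py) :: rest)
          = (py - c.2) :: nbsInter (nbsPoolOf curr_items (PySem.Set.add used c.1)) rest := by
        simp only [nbsInter, hm]
        congr 1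
        exact (congrArg (fun f => nbsInter f rest) hpool).symm
      rw [this, List.append_assoc]
      rfl

-- B's seen-list key loop computes nbsFKeys of the projected pairs
lemma nbs_keys_fold : ∀ (l : List (String × Int)) (seen : List String),
    l.foldl (fun seen e => if seen.contains e.1 then seen else seen ++ [e.1]) seen
      = seen ++ (nbsFKeys l).filter (fun k => !(seen.contains k)) := by
  intro l
  induction l with
  | nil => intro seen; simp [nbsFKeys]
  | cons e r ih =>
    intro seen
    obtain ⟨k, y⟩ := e
    show r.foldl _ (if seen.contains k then seen else seen ++ [k])
      = seen ++ (nbsFKeys ((k, y) :: r)).filter (fun j => !(seen.contains j))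
    rw [show nbsFKeys ((k, y) :: r) = k :: (nbsFKeys r).filter (fun j => !(j == k)) from rfl]
    by_cases h : seen.contains k = true
    · rw [if_pos h, ih seen, List.filter_cons]
      have hk : (!(seen.contains k)) = false := by rw [h]; rfl
      rw [hk]
      simp only [Bool.false_eq_true, if_false, List.filter_filter]
      congr 1
      refine List.filter_congr ?_
      intro a _
      cases hc : seen.contains a with
      | true => simp
      | false =>
        have hak : (a == k) = false := by
          rw [beq_eq_false_iff_ne]
          rintro rfl
          rw [h] at hc; cases hc
        simp [hak]
    · rw [if_neg h, ih (seen ++ [k]), List.filter_cons]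
      have hk : (!(seen.contains k)) = true := by
        cases hsk : seen.contains k
        · rfl
        · exact absurd hsk h
      rw [hk]
      simp only [if_true, List.append_assoc, List.singleton_append]
      congr 1
      rw [List.filter_filter]
      congr 1
      refine List.filter_congr ?_
      intro a _
      have hcontains : (seen ++ [k]).contains a = (seen.contains a || (a == k)) := by
        rw [Bool.eq_iff_iff]; simp
      rw [hcontains]
      cases hc : seen.contains a <;> cases hak : (a == k) <;> simp

lemma nbs_keys_eq (prev : List (String × Int × Int × Int × Int)) :
    nbsKeys prev = nbsFKeys (prev.map (fun e => (e.1, e.2.2.1))) := by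
  unfold nbsKeys
  have hmap : (prev.map (fun e => (e.1, e.2.2.1))).foldl
      (fun seen (e : String × Int) => if seen.contains e.1 then seen else seen ++ [e.1]) []
      = prev.foldl (fun seen e => if seen.contains e.1 then seen else seen ++ [e.1]) [] := by
    rw [List.foldl_map]
  rw [← hmap, nbs_keys_fold]
  simp

lemma nbs_proj_eq (l : List (String × Int × Int × Int × Int)) (k : String) :
    (l.filter (fun e => e.1 == k)).map (fun e => e.2.2.1)
      = nbsProjV k (l.map (fun e => (e.1, e.2.2.1))) := by
  unfold nbsProjV
  rw [List.filter_map, List.map_map]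
  rfl

lemma nbs_enum_filter_map (k : String) : ∀ (l : List (String × Int)) (s : Int),
    ((PySem.List.enumerate l s).filter (fun p => p.2.1 == k)).map (fun p => p.2)
      = l.filter (fun e => e.1 == k) := by
  intro l
  induction l with
  | nil => intro s; rfl
  | cons x l ih =>
    intro s
    rw [PySem.List.enumerate_cons, List.filter_cons, List.filter_cons]
    cases hq : (x.1 == k)
    · simpa [hq] using ih (s + 1)
    · simpa [hq] using ih (s + 1)

lemma nbs_pool_empty (curr_pairs : List (String × Int)) (k : String) :
    (nbsPoolOf curr_pairs PySem.Set.empty k).map (·.2) = nbsProjV k curr_pairs := by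
  unfold nbsPoolOf nbsProjV
  rw [List.map_map]
  have hpred : (PySem.List.enumerate curr_pairs 0).filter
        (fun p => p.2.1 == k && !(PySem.Set.contains PySem.Set.empty p.1))
      = (PySem.List.enumerate curr_pairs 0).filter (fun p => p.2.1 == k) := by
    refine List.filter_congr ?_
    intro p _
    rw [show PySem.Set.contains PySem.Set.empty p.1 = false from rfl]
    simp
  rw [hpred, ← nbs_enum_filter_map k curr_pairs 0, List.map_map]
  rfl

-- ===== VERDICT (by name: the statement is the Claim_ definition above) =====
theorem name_based_shift_spec : Claim_equal_name_based_shift := by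
  intro by_frame prev_fi curr_fi _ _
  unfold Spec_name_based_shift name_based_shift name_based_shift_alt
  dsimp only
  set prev := ((PySem.Dict.mk by_frame).get? prev_fi).getD [] with hprev
  set curr := ((PySem.Dict.mk by_frame).get? curr_fi).getD [] with hcurr
  set prevPairs := prev.map (fun e => (e.1, e.2.2.1)) with hpp
  set currPairs := curr.map (fun e => (e.1, e.2.2.1)) with hcp
  rw [nbs_stepA_fold currPairs prevPairs [] PySem.Set.empty, List.nil_append]
  rw [nbs_keys_eq prev, ← hpp]
  have hBfold : (nbsFKeys prevPairs).foldl (fun acc k =>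
        acc ++ nbsMatch ((prev.filter (fun e => e.1 == k)).map (fun e => e.2.2.1))
          ((curr.filter (fun e => e.1 == k)).map (fun e => e.2.2.1))) []
      = (nbsFKeys prevPairs).flatMap (fun k =>
          nbsMatch (nbsProjV k prevPairs)
            ((nbsPoolOf currPairs PySem.Set.empty k).map (·.2))) := by
    rw [PySem.List.foldl_append_eq_flatMap, List.nil_append]
    refine nbs_flatMap_congr _ _ _ ?_
    intro j _
    rw [nbs_proj_eq prev j, nbs_proj_eq curr j, ← hpp, ← hcp, nbs_pool_empty]
  rw [hBfold]
  have hperm := nbs_inter_perm prevPairs (nbsPoolOf currPairs PySem.Set.empty)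
    (fun k => nbs_poolOf_pairwise currPairs PySem.Set.empty k)
  set sA := nbsInter (nbsPoolOf currPairs PySem.Set.empty) prevPairs with hsA
  set sB := (nbsFKeys prevPairs).flatMap (fun k =>
      nbsMatch (nbsProjV k prevPairs)
        ((nbsPoolOf currPairs PySem.Set.empty k).map (·.2))) with hsB
  have hsorted : PySem.List.sorted sA (fun x => x) false = PySem.List.sorted sB (fun x => x) false :=
    PySem.List.sorted_eq_sorted_of_perm sA sB (fun x => x) (fun _ _ h => h) hperm
  have hlen : PySem.List.len sA = PySem.List.len sB := by
    unfold PySem.List.len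
    rw [hperm.length_eq]
  by_cases hnil : sB = []
  · have : sA = [] := (hnil ▸ hperm).eq_nil
    rw [if_pos hnil, if_neg (by simp [this])]
  · have hA : sA ≠ [] := fun h => hnil ((h ▸ hperm).symm.eq_nil)
    rw [if_neg hnil, if_pos hA, hsorted, hlen]
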